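-- pv_equiv track=rewrite | github.com/Sravya-Pogiri/table_shells | CRFAI/CRFAI.py | find_best_chunk
-- ===== SOURCE A (Python) =====
-- def find_best_chunk(chunks: list[str], question: str) -> str:
--     best_score = 0
--     best_chunk = ""
--     question_words = question.lower().split()
--     for chunk in chunks:
--         chunk_text = chunk.lower()
--         score = sum(word in chunk_text for word in question_words)
--         if score > best_score:
--             best_score = score
--             best_chunk = chunk
--     return best_chunk
-- ===== SOURCE B (Python) =====
-- def find_best_chunk(chunks: list[str], question: str) -> str:
--     question_words = question.lower().split()
--     scores = [sum(word in chunk.lower() for word in question_words) for chunk in chunks]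
--     best = max(scores, default=0)
--     if best == 0:
--         return ""
--     return chunks[scores.index(best)]
-- ===== Notes on version B (the rewrite author's own statement) =====
-- stated objective: alternative
-- what changed: Replaces the fused scan that tracks a running (best_score, best_chunk) pair with a two-phase table approach: build the full score list once, take its max (default 0), and select the chunk at the first index of that max; first-max tie-breaking and the empty result for all-zero scores are reproduced by max/list.index.
import Mathlib
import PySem

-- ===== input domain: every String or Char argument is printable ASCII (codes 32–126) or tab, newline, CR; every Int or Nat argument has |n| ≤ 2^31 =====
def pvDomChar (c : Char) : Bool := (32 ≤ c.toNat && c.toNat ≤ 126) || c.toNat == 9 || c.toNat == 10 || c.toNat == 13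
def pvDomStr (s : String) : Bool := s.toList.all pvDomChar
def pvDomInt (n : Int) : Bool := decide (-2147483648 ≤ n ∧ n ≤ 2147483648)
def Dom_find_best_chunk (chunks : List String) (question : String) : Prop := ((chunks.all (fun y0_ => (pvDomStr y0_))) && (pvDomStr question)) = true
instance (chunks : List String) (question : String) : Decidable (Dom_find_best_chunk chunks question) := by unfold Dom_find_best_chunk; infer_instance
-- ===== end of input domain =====

-- B replaces A's fused running-(best_score, best_chunk) scan with a score table built first,
-- then max(default 0) + first index selection (objective: alternative decomposition, same cost).

-- ===== PORT A =====
def find_best_chunk (chunks : List String) (question : String) : String :=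
  let question_words := PySem.Str.split₀ (PySem.Str.lower question)
  (chunks.foldl (fun (acc : Int × String) chunk =>
      let chunk_text := PySem.Str.lower chunk
      let score := (question_words.map
        (fun word => if PySem.Str.isIn word chunk_text then (1 : Int) else 0)).sum
      if score > acc.1 then (score, chunk) else acc) ((0 : Int), "")).2

-- ===== PORT B =====
def find_best_chunk_alt (chunks : List String) (question : String) : String :=
  let question_words := PySem.Str.split₀ (PySem.Str.lower question)
  let scores : List Int := chunks.map (fun chunk =>
      (question_words.map
        (fun word => if PySem.Str.isIn word (PySem.Str.lower chunk) then (1 : Int) else 0)).sum)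
  let best := PySem.List.maxD scores (fun x => x) 0
  if best = 0 then ""
  else
    match PySem.List.index? scores best with
    | some i => (PySem.List.pyGet? chunks (i : Int)).getD ""
    | none => ""

-- ===== PRECONDITION & SPEC =====
def Spec_find_best_chunk (chunks : List String) (question : String) (out : String) : Prop := out = find_best_chunk_alt chunks question
instance (chunks : List String) (question : String) (out : String) : Decidable (Spec_find_best_chunk chunks question out) := by unfold Spec_find_best_chunk; infer_instance

-- ===== CLAIM (what is proved, stated in full; the proofs are below) =====
def Claim_equal_find_best_chunk : Prop := ∀ (chunks : List String) (question : String), Dom_find_best_chunk chunks question → Spec_find_best_chunk chunks question (find_best_chunk chunks question)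

-- ===== LEMMAS AND PROOFS =====

-- selection formulation of A's running-max loop, generalized over the starting accumulator
def pvSelGen (score : String → Int) (chunks : List String) (bs : Int) (bc : String) : String :=
  let scores := chunks.map score
  let m := scores.foldl max bs
  if m = bs then bc
  else
    match PySem.List.index? scores m with
    | some i => chunks.getD i ""
    | none => bc

theorem pvLoopA (score : String → Int) (chunks : List String) (bs : Int) (bc : String) :
    chunks.foldl (fun (acc : Int × String) c =>
        if score c > acc.1 then (score c, c) else acc) (bs, bc)
      = ((chunks.map score).foldl max bs, pvSelGen score chunks bs bc) := by
  induction chunks generalizing bs bc with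
  | nil => simp [pvSelGen]
  | cons c t ih =>
    simp only [List.foldl_cons, List.map_cons]
    by_cases h : score c > bs
    · rw [if_pos h, ih]
      have hmax : max bs (score c) = score c := by omega
      have hle := (PySem.List.le_foldl_max (t.map score) (score c)).1
      refine Prod.ext (by simp [hmax]) ?_
      simp only [pvSelGen, List.map_cons, List.foldl_cons, hmax]
      set X := (t.map score).foldl max (score c) with hX
      by_cases hms : X = score c
      · rw [if_pos hms, if_neg (show ¬ X = bs by omega), hms,
          PySem.List.index?_cons_self]
        simp
      · rw [if_neg hms, if_neg (show ¬ X = bs by omega)]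
        have hmem : X ∈ t.map score := by
          rcases PySem.List.foldl_max_mem (t.map score) (score c) with h' | h'
          · exact absurd h' hms
          · exact h'
        have hsome := (PySem.List.index?_isSome_iff (t.map score) X).2 hmem
        obtain ⟨j, hj⟩ : ∃ j, PySem.List.index? (t.map score) X = some j :=
          ⟨_, (Option.some_get hsome).symm⟩
        rw [PySem.List.index?_cons_of_ne _ (fun e => hms e.symm), hj]
        simp
    · rw [if_neg h, ih]
      have hmax : max bs (score c) = bs := by omega
      refine Prod.ext (by simp [hmax]) ?_
      simp only [pvSelGen, List.map_cons, List.foldl_cons, hmax]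
      set X := (t.map score).foldl max bs with hX
      by_cases hmbs : X = bs
      · rw [if_pos hmbs, if_pos hmbs]
      · rw [if_neg hmbs, if_neg hmbs]
        have hle := (PySem.List.le_foldl_max (t.map score) bs).1
        have hms : X ≠ score c := by omega
        have hmem : X ∈ t.map score := by
          rcases PySem.List.foldl_max_mem (t.map score) bs with h' | h'
          · exact absurd h' hmbs
          · exact h'
        have hsome := (PySem.List.index?_isSome_iff (t.map score) X).2 hmem
        obtain ⟨j, hj⟩ : ∃ j, PySem.List.index? (t.map score) X = some j :=
          ⟨_, (Option.some_get hsome).symm⟩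
        rw [PySem.List.index?_cons_of_ne _ (fun e => hms e.symm), hj]
        simp

theorem pvScore_nonneg (qws : List String) (c : String) :
    0 ≤ (qws.map (fun w => if PySem.Str.isIn w (PySem.Str.lower c) then (1 : Int) else 0)).sum := by
  apply List.sum_nonneg
  intro x hx
  rcases List.mem_map.1 hx with ⟨w, _, rfl⟩
  split <;> omega

-- maxD with default 0 agrees with the running max from 0 when all elements are nonneg
theorem pvMaxD_eq_foldl (scores : List Int) (hnn : ∀ x ∈ scores, 0 ≤ x) :
    PySem.List.maxD scores (fun x => x) 0 = scores.foldl max 0 := by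
  cases scores with
  | nil => rfl
  | cons s ss =>
    have h0 : max 0 s = s := by
      have := hnn s (by simp)
      omega
    simp only [PySem.List.maxD, PySem.List.max?_id_cons, Option.getD_some,
      List.foldl_cons, h0]

theorem find_best_chunk_spec' (chunks : List String) (question : String) :
    find_best_chunk chunks question = find_best_chunk_alt chunks question := by
  unfold find_best_chunk find_best_chunk_alt
  simp only [pvLoopA]
  set score : String → Int := fun c =>
    ((PySem.Str.split₀ (PySem.Str.lower question)).map
      (fun w => if PySem.Str.isIn w (PySem.Str.lower c) then (1 : Int) else 0)).sum with hscore
  have hnn : ∀ x ∈ chunks.map score, 0 ≤ x := by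
    intro x hx
    rcases List.mem_map.1 hx with ⟨c, _, rfl⟩
    exact pvScore_nonneg _ c
  rw [pvMaxD_eq_foldl (chunks.map score) hnn]
  simp only [pvSelGen]
  by_cases h0 : (chunks.map score).foldl max 0 = 0
  · rw [if_pos h0, if_pos h0]
  · rw [if_neg h0, if_neg h0]
    cases hidx : PySem.List.index? (chunks.map score) ((chunks.map score).foldl max 0) with
    | none => rfl
    | some i =>
      simp only [PySem.List.pyGet?_natCast]
      exact (List.getD_eq_getElem?_getD).symm

-- ===== VERDICT (by name: the statement is the Claim_ definition above) =====
theorem find_best_chunk_spec : Claim_equal_find_best_chunk := by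
  intro chunks question _
  exact find_best_chunk_spec' chunks question
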